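-- pv_equiv track=rewrite | github.com/tinmarr/ift1015 | boggle.py | calcul_point
-- ===== SOURCE A (Python) =====
-- def calcul_point(mots: list[str]) -> int:
--     """
--     J'assume que tout les mots sont validés avant et que la liste mots contient
--     seulement les mots legals et non rejeté.
--
--     Donc le parametre "grille" n'est pas necessaire.
--     """
--     total_point = 0
--     for mot in mots:
--         if len(mot) == 3:
--             total_point += 1
--         elif len(mot) == 4:
--             total_point += 2
--     return total_point
-- ===== SOURCE B (Python) =====
-- def calcul_point(mots: list[str]) -> int:
--     # Staged passes: one filter pass per scoring length, then a closed-form combine.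
--     return sum(1 for m in mots if len(m) == 3) + 2 * sum(1 for m in mots if len(m) == 4)
-- ===== Notes on version B (the rewrite author's own statement) =====
-- stated objective: simpler
-- what changed: Replaces A's single branching-accumulator loop with two independent filter passes (one per scoring length) combined by the closed form count3 + 2*count4.
import Mathlib
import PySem

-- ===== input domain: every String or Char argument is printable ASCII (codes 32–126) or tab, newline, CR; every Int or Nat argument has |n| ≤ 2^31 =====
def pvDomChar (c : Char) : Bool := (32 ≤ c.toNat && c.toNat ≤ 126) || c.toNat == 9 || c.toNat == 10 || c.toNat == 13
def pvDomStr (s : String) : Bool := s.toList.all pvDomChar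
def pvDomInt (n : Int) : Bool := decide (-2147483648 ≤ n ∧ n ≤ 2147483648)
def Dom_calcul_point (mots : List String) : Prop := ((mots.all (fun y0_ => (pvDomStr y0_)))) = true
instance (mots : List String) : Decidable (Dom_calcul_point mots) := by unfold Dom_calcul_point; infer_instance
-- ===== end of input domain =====

-- B replaces A's single branching-accumulator loop with two independent filter/count passes combined by a closed form (simpler decomposition, same cost).

-- ===== PORT A =====
def calcul_point (mots : List String) : Int :=
  mots.foldl (fun total_point mot =>
    if PySem.Str.len mot = 3 then total_point + 1
    else if PySem.Str.len mot = 4 then total_point + 2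
    else total_point) 0

-- ===== PORT B =====
def calcul_point_alt (mots : List String) : Int :=
  (mots.countP (fun m => PySem.Str.len m == 3) : Int)
    + 2 * (mots.countP (fun m => PySem.Str.len m == 4) : Int)

-- ===== PRECONDITION & SPEC =====
def Spec_calcul_point (mots : List String) (out : Int) : Prop := out = calcul_point_alt mots
instance (mots : List String) (out : Int) : Decidable (Spec_calcul_point mots out) := by unfold Spec_calcul_point; infer_instance

-- ===== CLAIM (what is proved, stated in full; the proofs are below) =====
def Claim_equal_calcul_point : Prop := ∀ (mots : List String), Dom_calcul_point mots → Spec_calcul_point mots (calcul_point mots)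

-- ===== LEMMAS AND PROOFS =====

-- A's fold equals count-of-length-3 + 2·count-of-length-4.
theorem calcul_point_foldl (mots : List String) (acc : Int) :
    mots.foldl (fun total_point mot =>
      if PySem.Str.len mot = 3 then total_point + 1
      else if PySem.Str.len mot = 4 then total_point + 2
      else total_point) acc
    = acc + (mots.countP (fun m => PySem.Str.len m == 3) : Int)
        + 2 * (mots.countP (fun m => PySem.Str.len m == 4) : Int) := by
  induction mots generalizing acc with
  | nil => simp
  | cons m ms ih =>
    rw [List.foldl_cons, ih]
    simp only [List.countP_cons, beq_iff_eq]
    split_ifs <;> push_cast <;> omega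

-- ===== VERDICT (by name: the statement is the Claim_ definition above) =====
theorem calcul_point_spec : Claim_equal_calcul_point := by
  intro mots _
  unfold Spec_calcul_point calcul_point calcul_point_alt
  rw [calcul_point_foldl]
  ring
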